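-- pv_equiv track=rewrite | github.com/Ferisii/adventofcode | 2020/Day 10/day10.py | IntWidthOccurrences
-- ===== SOURCE A (Python) =====
-- def IntWidthOccurrences(num_list: list, width1: int=1, width2: int=3) -> tuple:
--     a, b = 0, 0
--     for index in range(len(num_list) - 1):
--         if (tmp_value :=num_list[index+1] - num_list[index]) == width1:
--             a += 1
--         elif tmp_value == width2:
--             b += 1
--
--     return a, b
-- ===== SOURCE B (Python) =====
-- def IntWidthOccurrences(num_list: list, width1: int=1, width2: int=3) -> tuple:
--     diffs = [y - x for x, y in zip(num_list, num_list[1:])]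
--     return diffs.count(width1), diffs.count(width2)
-- ===== Notes on version B (the rewrite author's own statement) =====
-- stated objective: idiomatic
-- what changed: B materialises the adjacent-differences list once (zip of the list with its own tail) and answers with two list.count lookups, replacing A's index-driven loop with branch-per-element accumulators.
-- outside the precondition, e.g. on IntWidthOccurrences([0, 1, 2], 1, 1): A returns (2, 0), B returns (2, 2)
import Mathlib
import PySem

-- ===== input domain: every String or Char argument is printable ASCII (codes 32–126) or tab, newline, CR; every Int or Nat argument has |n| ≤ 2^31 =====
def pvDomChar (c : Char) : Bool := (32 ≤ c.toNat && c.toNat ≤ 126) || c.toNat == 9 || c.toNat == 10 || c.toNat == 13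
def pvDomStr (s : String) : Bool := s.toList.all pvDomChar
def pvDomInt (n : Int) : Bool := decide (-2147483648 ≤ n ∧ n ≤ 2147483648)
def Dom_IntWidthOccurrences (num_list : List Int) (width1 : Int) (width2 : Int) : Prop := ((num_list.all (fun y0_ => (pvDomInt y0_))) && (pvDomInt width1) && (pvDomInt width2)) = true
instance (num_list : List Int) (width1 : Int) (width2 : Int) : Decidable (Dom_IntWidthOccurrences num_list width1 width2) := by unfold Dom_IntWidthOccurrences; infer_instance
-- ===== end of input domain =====

-- B builds the adjacent-differences list once (zip with the tail) and returns two list.count lookups,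
-- replacing A's index loop with if/elif accumulators; objective: a more idiomatic decomposition.


-- ===== PORT A =====
def IntWidthOccurrences (num_list : List Int) (width1 : Int) (width2 : Int) : Int × Int :=
  (PySem.List.pyRange 0 ((num_list.length : Int) - 1)).foldl
    (fun (ab : Int × Int) index =>
      let tmp_value := PySem.List.pyGetD num_list (index + 1) 0 - PySem.List.pyGetD num_list index 0
      if tmp_value = width1 then (ab.1 + 1, ab.2)
      else if tmp_value = width2 then (ab.1, ab.2 + 1)
      else ab)
    (0, 0)

-- ===== PORT B =====
def IntWidthOccurrences_alt (num_list : List Int) (width1 : Int) (width2 : Int) : Int × Int :=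
  let diffs := (num_list.zip num_list.tail).map (fun p => p.2 - p.1)
  ((diffs.count width1 : Int), (diffs.count width2 : Int))

-- ===== PRECONDITION & SPEC =====
-- Pre_ excludes only the degenerate calls with equal widths where that width actually occurs as an adjacent
-- difference: there A's elif credits only the first accumulator (returning (n, 0)) while B's tabulation
-- returns the count in both slots (n, n) — both defensible on such a degenerate call.
def Pre_IntWidthOccurrences (num_list : List Int) (width1 : Int) (width2 : Int) : Prop :=
  width1 ≠ width2 ∨ width1 ∉ (num_list.zip num_list.tail).map (fun p => p.2 - p.1)
instance (num_list : List Int) (width1 : Int) (width2 : Int) : Decidable (Pre_IntWidthOccurrences num_list width1 width2) := by unfold Pre_IntWidthOccurrences; infer_instance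
def pvWitness_IntWidthOccurrences : List Int × Int × Int := ([0, 1, 4, 5, 6, 9], 1, 3)
def Spec_IntWidthOccurrences (num_list : List Int) (width1 : Int) (width2 : Int) (out : Int × Int) : Prop := out = IntWidthOccurrences_alt num_list width1 width2
instance (num_list : List Int) (width1 : Int) (width2 : Int) (out : Int × Int) : Decidable (Spec_IntWidthOccurrences num_list width1 width2 out) := by unfold Spec_IntWidthOccurrences; infer_instance

-- ===== CLAIM (what is proved, stated in full; the proofs are below) =====
def Claim_equal_IntWidthOccurrences : Prop := ∀ (num_list : List Int) (width1 : Int) (width2 : Int), Dom_IntWidthOccurrences num_list width1 width2 → Pre_IntWidthOccurrences num_list width1 width2 → Spec_IntWidthOccurrences num_list width1 width2 (IntWidthOccurrences num_list width1 width2)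

-- ===== LEMMAS AND PROOFS =====

-- the indexed differences read by A's loop are exactly B's zip-with-tail differences
lemma map_range_getD_eq_diffs (xs : List Int) :
    (List.range (xs.length - 1)).map (fun i => xs.getD (i + 1) 0 - xs.getD i 0)
      = (xs.zip xs.tail).map (fun p => p.2 - p.1) := by
  induction xs with
  | nil => simp
  | cons a t ih =>
    cases t with
    | nil => simp
    | cons b u =>
      have h : (a :: b :: u).length - 1 = ((b :: u).length - 1) + 1 := by
        simp [List.length_cons]
      rw [h, List.range_succ_eq_map, List.map_cons, List.map_map]
      have ht : ((fun i => (a :: b :: u).getD (i + 1) 0 - (a :: b :: u).getD i 0) ∘ Nat.succ)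
          = (fun i => (b :: u).getD (i + 1) 0 - (b :: u).getD i 0) := by
        funext i
        simp [List.getD]
      rw [ht, ih]
      simp [List.zip_cons_cons, List.getD]

-- A's indexed loop is the same fold taken over the differences list
lemma A_eq_fold_diffs (num_list : List Int) (width1 width2 : Int) :
    IntWidthOccurrences num_list width1 width2
      = ((num_list.zip num_list.tail).map (fun p => p.2 - p.1)).foldl
          (fun (ab : Int × Int) d =>
            if d = width1 then (ab.1 + 1, ab.2)
            else if d = width2 then (ab.1, ab.2 + 1)
            else ab) (0, 0) := by
  unfold IntWidthOccurrences
  rcases num_list with _ | ⟨a, t⟩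
  · simp [PySem.List.pyRange]
  · set xs := a :: t with hxs
    have hlen : ((xs.length : Int) - 1) = ((xs.length - 1 : Nat) : Int) := by
      simp [hxs]
    rw [hlen, PySem.List.pyRange_zero_natCast, List.foldl_map]
    have hbody : ∀ (ab : Int × Int), ∀ i ∈ List.range (xs.length - 1),
        (fun (ab : Int × Int) (k : Nat) =>
          let tmp_value := PySem.List.pyGetD xs ((k : Int) + 1) 0 - PySem.List.pyGetD xs (k : Int) 0
          if tmp_value = width1 then (ab.1 + 1, ab.2)
          else if tmp_value = width2 then (ab.1, ab.2 + 1)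
          else ab) ab i
        = (fun (ab : Int × Int) (k : Nat) =>
            let d := xs.getD (k + 1) 0 - xs.getD k 0
            if d = width1 then (ab.1 + 1, ab.2)
            else if d = width2 then (ab.1, ab.2 + 1)
            else ab) ab i := by
      intro ab i _
      have h1 : ((i : Int) + 1) = ((i + 1 : Nat) : Int) := by push_cast; ring
      simp only [h1, PySem.List.pyGetD_natCast]
    rw [PySem.List.foldl_congr_mem _ _ _ _ hbody, ← List.foldl_map
      (f := fun i => xs.getD (i + 1) 0 - xs.getD i 0)
      (g := fun (ab : Int × Int) d =>
        if d = width1 then (ab.1 + 1, ab.2)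
        else if d = width2 then (ab.1, ab.2 + 1)
        else ab),
      map_range_getD_eq_diffs]

theorem IntWidthOccurrences_spec_aux (num_list : List Int) (width1 width2 : Int)
    (hpre : Pre_IntWidthOccurrences num_list width1 width2) :
    IntWidthOccurrences num_list width1 width2 = IntWidthOccurrences_alt num_list width1 width2 := by
  rw [A_eq_fold_diffs]
  unfold IntWidthOccurrences_alt
  set ds := (num_list.zip num_list.tail).map (fun p => p.2 - p.1) with hds
  by_cases hne : width1 = width2
  · -- equal widths: Pre_ guarantees the shared width never occurs among the differences
    have hnm : width1 ∉ ds := by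
      rcases hpre with h | h
      · exact absurd hne h
      · exact h
    have hzero1 : ds.count width1 = 0 := List.count_eq_zero.mpr hnm
    have hzero2 : ds.count width2 = 0 := by rw [← hne]; exact hzero1
    have hid : ∀ (ab : Int × Int), ∀ d ∈ ds,
        (fun (ab : Int × Int) d =>
          if d = width1 then (ab.1 + 1, ab.2)
          else if d = width2 then (ab.1, ab.2 + 1)
          else ab) ab d = (fun (ab : Int × Int) _ => ab) ab d := by
      intro ab d hd
      have h1 : d ≠ width1 := fun h => hnm (h ▸ hd)
      have h2 : d ≠ width2 := by rw [← hne]; exact h1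
      simp [h1, h2]
    rw [PySem.List.foldl_congr_mem _ _ _ _ hid, PySem.List.foldl_ignore]
    show (0, 0) = ((((ds.count width1 : Nat)) : Int), (((ds.count width2 : Nat)) : Int))
    rw [hzero1, hzero2]
    simp
  · -- distinct widths: split the pair fold into two independent counting folds
    have hsplit : (fun (ab : Int × Int) d =>
        if d = width1 then (ab.1 + 1, ab.2)
        else if d = width2 then (ab.1, ab.2 + 1)
        else ab)
      = (fun (ab : Int × Int) d =>
          ((if d = width1 then ab.1 + 1 else ab.1),
           (if d ≠ width1 ∧ d = width2 then ab.2 + 1 else ab.2))) := by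
      funext ab d
      by_cases h1 : d = width1 <;> by_cases h2 : d = width2 <;> simp_all
    rw [hsplit,
      PySem.List.foldl_prod_mk
        (f := fun acc d => if d = width1 then acc + 1 else acc)
        (g := fun acc d => if d ≠ width1 ∧ d = width2 then acc + 1 else acc)]
    have hc1 : List.foldl (fun acc d => if d = width1 then acc + 1 else acc) 0 ds
        = ((ds.count width1 : Nat) : Int) := by
      rw [PySem.List.foldl_ite_add_one (fun d => d = width1)]
      have hcp1 : List.countP (fun d => decide (d = width1)) ds = ds.count width1 := by
        rw [List.count]
        apply List.countP_congr
        intro d _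
        simp
      rw [hcp1]; omega
    have hc2 : List.foldl (fun acc d => if d ≠ width1 ∧ d = width2 then acc + 1 else acc) 0 ds
        = ((ds.count width2 : Nat) : Int) := by
      rw [PySem.List.foldl_ite_add_one (fun d => d ≠ width1 ∧ d = width2)]
      have hcp : List.countP (fun d => decide (d ≠ width1 ∧ d = width2)) ds = ds.count width2 := by
        rw [List.count]
        apply List.countP_congr
        intro d _
        by_cases h : d = width2 <;> simp [h] <;> exact fun h => hne h.symm
      rw [hcp]; omega
    rw [hc1, hc2]

-- ===== VERDICT (by name: the statement is the Claim_ definition above) =====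
theorem IntWidthOccurrences_spec : Claim_equal_IntWidthOccurrences := by
  intro num_list width1 width2 _ hpre
  exact IntWidthOccurrences_spec_aux num_list width1 width2 hpre
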